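-- pv_equiv track=rewrite | github.com/chrisburke716/historyBookLLM | src/history_book/data_ingestion/book_ingestion.py | organize_chapter_titles_by_book
-- ===== SOURCE A (Python) =====
-- def organize_chapter_titles_by_book(chapter_titles: list[str]) -> list[list[str]]:
--     """
--     Groups chapter titles by book.
--     Args:
--         chapter_titles (list[str]): A flat list of chapter titles.
--     Returns:
--         list[list[str]]: A list of lists, where each inner list contains chapter titles for a book.
--     """
--     chapters_by_book = []
--
--     # Find where each book's chapters start in the flat chapter_titles list
--     book_chapter_indices = []
--     current_idx = 0
--
--     # Each book starts with "Introduction"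
--     for i, title in enumerate(chapter_titles):
--         if title == "Introduction" and i > current_idx:
--             book_chapter_indices.append(current_idx)
--             current_idx = i
--
--     # Add the last section
--     book_chapter_indices.append(current_idx)
--     # Add the end index
--     book_chapter_indices.append(len(chapter_titles))
--
--     # Create lists of chapter titles for each book
--     for i in range(len(book_chapter_indices) - 1):
--         start_idx = book_chapter_indices[i]
--         end_idx = book_chapter_indices[i + 1]
--         chapters_by_book.append(chapter_titles[start_idx:end_idx])
--
--     return chapters_by_book
-- ===== SOURCE B (Python) =====
-- def organize_chapter_titles_by_book(chapter_titles: list[str]) -> list[list[str]]: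
--     """Single-pass grouping: start a new group at every "Introduction" after index 0."""
--     result = []
--     current = []
--     for i, title in enumerate(chapter_titles):
--         if title == "Introduction" and i > 0:
--             result.append(current)
--             current = []
--         current.append(title)
--     result.append(current)
--     return result
-- ===== Notes on version B (the rewrite author's own statement) =====
-- stated objective: simpler
-- what changed: Replaces the two-phase approach (collect boundary indices, then slice the list between consecutive indices) with a single accumulation pass that builds the groups directly.
import Mathlib
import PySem

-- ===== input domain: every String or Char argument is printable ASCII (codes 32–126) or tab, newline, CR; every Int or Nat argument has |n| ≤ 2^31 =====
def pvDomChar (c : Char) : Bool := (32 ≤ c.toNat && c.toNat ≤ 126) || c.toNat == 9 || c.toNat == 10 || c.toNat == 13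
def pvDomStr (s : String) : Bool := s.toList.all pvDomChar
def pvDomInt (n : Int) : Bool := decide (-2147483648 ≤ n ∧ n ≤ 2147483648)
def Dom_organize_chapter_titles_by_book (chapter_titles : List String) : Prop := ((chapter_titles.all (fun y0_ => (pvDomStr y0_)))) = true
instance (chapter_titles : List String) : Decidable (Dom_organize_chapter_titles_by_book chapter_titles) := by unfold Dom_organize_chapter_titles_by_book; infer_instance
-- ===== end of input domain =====

-- B replaces A's two-phase boundary-index-then-slice scheme by a single accumulation pass
-- that builds the groups directly (objective: simpler).


-- ===== PORT A =====
def organize_chapter_titles_by_book (chapter_titles : List String) : List (List String) :=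
  -- first loop: collect the start index of each book (state = (book_chapter_indices, current_idx))
  let st := (PySem.List.enumerate chapter_titles 0).foldl
    (fun (st : List Int × Int) (p : Int × String) =>
      if p.2 = "Introduction" ∧ st.2 < p.1 then (st.1 ++ [st.2], p.1) else st)
    ([], 0)
  let idxs : List Int := st.1 ++ [st.2] ++ [(chapter_titles.length : Int)]
  -- second loop: slice chapter_titles between consecutive indices
  -- (idxs[i] and idxs[i+1] are always in range; pyGetD's default 0 is never used)
  (PySem.List.pyRange 0 ((idxs.length : Int) - 1) 1).foldl
    (fun (acc : List (List String)) (i : Int) =>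
      acc ++ [PySem.List.slice chapter_titles (some (PySem.List.pyGetD idxs i 0))
                                              (some (PySem.List.pyGetD idxs (i + 1) 0))])
    []

-- ===== PORT B =====
def organize_chapter_titles_by_book_alt (chapter_titles : List String) : List (List String) :=
  -- single pass: state = (result, current); start a new group at every "Introduction" after index 0
  let st := (PySem.List.enumerate chapter_titles 0).foldl
    (fun (st : List (List String) × List String) (p : Int × String) =>
      let st := if p.2 = "Introduction" ∧ 0 < p.1 then (st.1 ++ [st.2], ([] : List String)) else st
      (st.1, st.2 ++ [p.2]))
    ([], [])
  st.1 ++ [st.2]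

-- ===== PRECONDITION & SPEC =====
def Spec_organize_chapter_titles_by_book (chapter_titles : List String) (out : List (List String)) : Prop := out = organize_chapter_titles_by_book_alt chapter_titles
instance (chapter_titles : List String) (out : List (List String)) : Decidable (Spec_organize_chapter_titles_by_book chapter_titles out) := by unfold Spec_organize_chapter_titles_by_book; infer_instance

-- ===== CLAIM (what is proved, stated in full; the proofs are below) =====
def Claim_equal_organize_chapter_titles_by_book : Prop := ∀ (chapter_titles : List String), Dom_organize_chapter_titles_by_book chapter_titles → Spec_organize_chapter_titles_by_book chapter_titles (organize_chapter_titles_by_book chapter_titles)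

-- ===== LEMMAS AND PROOFS =====

-- the list of slices of ct between consecutive entries of an index list
def pvChain (ct : List String) : List Int → List (List String)
  | a :: b :: t => PySem.List.slice ct (some a) (some b) :: pvChain ct (b :: t)
  | _ => []

theorem pvChain_snoc (ct : List String) (l : List Int) (a b : Int) :
    pvChain ct (l ++ [a, b]) = pvChain ct (l ++ [a]) ++ [PySem.List.slice ct (some a) (some b)] := by
  induction l with
  | nil => simp [pvChain]
  | cons x l ih =>
    cases l with
    | nil => simp [pvChain]
    | cons y t => simpa [pvChain] using ih

-- A's second loop, written as a map over positions, equals pvChain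
theorem pvMap_chain (ct : List String) (t : List Int) (a b : Int) :
    (List.range ((a :: b :: t).length - 1)).map
      (fun k => PySem.List.slice ct (some ((a :: b :: t).getD k 0)) (some ((a :: b :: t).getD (k + 1) 0)))
      = pvChain ct (a :: b :: t) := by
  induction t generalizing a b with
  | nil => simp [pvChain]
  | cons c t ih =>
    have h := ih b c
    simp only [List.length_cons, Nat.add_sub_cancel, List.getD_cons_succ] at h ⊢
    rw [List.range_succ_eq_map]
    simp only [List.map_cons, List.map_map, Function.comp_def, List.getD_cons_succ,
      List.getD_cons_zero, pvChain, h]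

-- A's second loop as a map over positions, for any index list of length ≥ 2
theorem pvMap_chain' (ct : List String) (l : List Int) (h : 2 ≤ l.length) :
    (List.range (l.length - 1)).map
      (fun k => PySem.List.slice ct (some (l.getD k 0)) (some (l.getD (k + 1) 0)))
      = pvChain ct l := by
  match l with
  | a :: b :: t => exact pvMap_chain ct t a b
  | [] => simp at h
  | [a] => simp at h

-- current = ct[cur:n] grows by one element when the scan passes position n
theorem pvTakeSnoc (pre rest : List String) (x : String) (cur : Nat) (h : cur ≤ pre.length) :
    (((pre ++ x :: rest).drop cur).take (pre.length - cur)) ++ [x]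
      = ((pre ++ x :: rest).drop cur).take (pre.length + 1 - cur) := by
  rw [List.drop_append_of_le_length h]
  have hl : (pre.drop cur).length = pre.length - cur := by simp
  rw [show pre.length + 1 - cur = (pre.length - cur) + 1 by omega, ← hl,
    List.take_length_add_append, List.take_append]
  simp

-- main invariant: A's state (bs, cur) and B's state (gs, current) stay linked over the same suffix
theorem pvMain (rest : List String) : ∀ (pre : List String) (bs : List Int) (cur : Nat)
    (gs : List (List String)),
    cur ≤ pre.length → (0 < pre.length → cur < pre.length) →
    pvChain (pre ++ rest) (bs ++ [(cur : Int)]) = gs →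
    (let st := (PySem.List.enumerate rest pre.length).foldl
        (fun (st : List Int × Int) (p : Int × String) =>
          if p.2 = "Introduction" ∧ st.2 < p.1 then (st.1 ++ [st.2], p.1) else st)
        (bs, (cur : Int))
     pvChain (pre ++ rest) (st.1 ++ [st.2, ((pre ++ rest).length : Int)]))
    = (let st := (PySem.List.enumerate rest pre.length).foldl
        (fun (st : List (List String) × List String) (p : Int × String) =>
          let st := if p.2 = "Introduction" ∧ 0 < p.1 then (st.1 ++ [st.2], ([] : List String)) else st
          (st.1, st.2 ++ [p.2]))
        (gs, ((pre ++ rest).drop cur).take (pre.length - cur))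
       st.1 ++ [st.2]) := by
  induction rest with
  | nil =>
    intro pre bs cur gs h1 h2 h3
    simp only [PySem.List.enumerate_nil, List.foldl_nil, List.append_nil] at h3 ⊢
    rw [show bs ++ [(cur : Int), (pre.length : Int)] = (bs ++ [(cur : Int)]) ++ [(cur : Int), (pre.length : Int)].tail by simp,
      show ((bs ++ [(cur : Int)]) ++ [(cur : Int), (pre.length : Int)].tail) = bs ++ [(cur : Int), (pre.length : Int)] by simp]
    rw [pvChain_snoc, h3, PySem.List.slice_natCast]
  | cons x rest' ih =>
    intro pre bs cur gs h1 h2 h3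
    have e1 : (pre ++ [x]) ++ rest' = pre ++ x :: rest' := by simp
    simp only [PySem.List.enumerate_cons, List.foldl_cons]
    by_cases hI : x = "Introduction" ∧ 0 < pre.length
    · have hA : x = "Introduction" ∧ ((cur : Int) < (pre.length : Int)) :=
        ⟨hI.1, by exact_mod_cast h2 hI.2⟩
      have hB : x = "Introduction" ∧ ((0 : Int) < (pre.length : Int)) :=
        ⟨hI.1, by exact_mod_cast hI.2⟩
      simp only [if_pos hA, if_pos hB]
      have h3' : pvChain ((pre ++ [x]) ++ rest') ((bs ++ [(cur : Int)]) ++ [((pre.length : Nat) : Int)])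
          = gs ++ [((pre ++ x :: rest').drop cur).take (pre.length - cur)] := by
        rw [e1, show (bs ++ [(cur : Int)]) ++ [((pre.length : Nat) : Int)] = bs ++ [(cur : Int), (pre.length : Int)] by simp,
          pvChain_snoc, h3, PySem.List.slice_natCast]
      have := ih (pre ++ [x]) (bs ++ [(cur : Int)]) pre.length
        (gs ++ [((pre ++ x :: rest').drop cur).take (pre.length - cur)])
        (by simp) (by intro _; simp) h3'
      simp only [e1, List.length_append, List.length_cons, List.length_nil] at this ⊢
      have e2 : ((pre.length + 1 : Nat) : Int) = (pre.length : Int) + 1 := by push_cast; ring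
      have e3 : ((pre ++ x :: rest').drop pre.length).take (pre.length + 1 - pre.length) = [x] := by
        rw [← e1, List.append_assoc, List.drop_left]
        simp
      rw [e2, e3] at this
      simpa using this
    · have hA : ¬ (x = "Introduction" ∧ ((cur : Int) < (pre.length : Int))) := by
        rintro ⟨hx, hlt⟩
        have : cur < pre.length := by exact_mod_cast hlt
        exact hI ⟨hx, by omega⟩
      have hB : ¬ (x = "Introduction" ∧ ((0 : Int) < (pre.length : Int))) := by
        rintro ⟨hx, hlt⟩
        exact hI ⟨hx, by exact_mod_cast hlt⟩
      simp only [if_neg hA, if_neg hB]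
      have h3' : pvChain ((pre ++ [x]) ++ rest') (bs ++ [(cur : Int)]) = gs := by rw [e1]; exact h3
      have := ih (pre ++ [x]) bs cur gs
        (by simp; omega) (by intro _; simp; omega) h3'
      simp only [e1, List.length_append, List.length_cons, List.length_nil] at this ⊢
      have e2 : ((pre.length + 1 : Nat) : Int) = (pre.length : Int) + 1 := by push_cast; ring
      rw [e2, ← pvTakeSnoc pre rest' x cur h1] at this
      simpa using this

-- ===== VERDICT (by name: the statement is the Claim_ definition above) =====
theorem organize_chapter_titles_by_book_spec : Claim_equal_organize_chapter_titles_by_book := by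
  intro ct _
  unfold Spec_organize_chapter_titles_by_book
  have main := pvMain ct [] [] 0 [] (by simp) (by simp) (by simp [pvChain])
  simp only [List.nil_append, List.length_nil, Nat.cast_zero, List.drop_zero, List.take_zero,
    Nat.sub_zero] at main
  rw [organize_chapter_titles_by_book, organize_chapter_titles_by_book_alt]
  rw [PySem.List.foldl_append_singleton_eq_map]
  set st := (PySem.List.enumerate ct 0).foldl
    (fun (st : List Int × Int) (p : Int × String) =>
      if p.2 = "Introduction" ∧ st.2 < p.1 then (st.1 ++ [st.2], p.1) else st)
    (([] : List Int), (0 : Int)) with hst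
  have hlen : ((st.1 ++ [st.2] ++ [(ct.length : Int)]).length : Int) - 1
      = ((st.1.length + 1 : Nat) : Int) := by simp; ring
  rw [hlen, PySem.List.pyRange_zero_natCast, List.map_map]
  have hmap : ∀ k : Nat,
      ((fun i => PySem.List.slice ct
          (some (PySem.List.pyGetD (st.1 ++ [st.2] ++ [(ct.length : Int)]) i 0))
          (some (PySem.List.pyGetD (st.1 ++ [st.2] ++ [(ct.length : Int)]) (i + 1) 0))) ∘
        (fun k : Nat => (k : Int))) k
      = (fun k : Nat => PySem.List.slice ct
          (some ((st.1 ++ [st.2] ++ [(ct.length : Int)]).getD k 0))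
          (some ((st.1 ++ [st.2] ++ [(ct.length : Int)]).getD (k + 1) 0))) k := by
    intro k
    simp only [Function.comp_apply]
    rw [show ((k : Int) + 1) = ((k + 1 : Nat) : Int) by push_cast; ring,
      PySem.List.pyGetD_natCast, PySem.List.pyGetD_natCast]
  rw [List.map_congr_left (fun k _ => hmap k)]
  have h2 : st.1.length + 1 = (st.1 ++ [st.2] ++ [(ct.length : Int)]).length - 1 := by simp
  rw [h2, pvMap_chain' ct _ (by simp)]
  rw [show st.1 ++ [st.2] ++ [(ct.length : Int)] = st.1 ++ [st.2, (ct.length : Int)] by simp]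
  simpa using main
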